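-- pv_equiv track=rewrite | github.com/StarSein/BaekJoon | 백준/Gold/2143. 두 배열의 합/두 배열의 합.py | solution
-- ===== SOURCE A (Python) =====
-- from collections import Counter
-- from typing import List
--
-- def solution(T: int, n: int, A: List[int], m: int, B: List[int]) -> int:
--     psumA = [0]
--     for num in A:
--         psumA.append(psumA[-1] + num)
--
--     cntA = Counter((psumA[i] - psumA[j] for i in range(1, n + 1) for j in range(i)))
--
--     psumB = [0]
--     for num in B:
--         psumB.append(psumB[-1] + num)
--
--     cntB = Counter((psumB[i] - psumB[j] for i in range(1, m + 1) for j in range(i)))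
--
--     answer = sum(cntA[a] * cntB[T - a] for a in cntA.keys())
--     return answer
-- ===== SOURCE B (Python) =====
-- from collections import Counter
-- from typing import List
--
--
-- def solution(T: int, n: int, A: List[int], m: int, B: List[int]) -> int:
--     # No prefix-sum tables: sweep each array once, maintaining the list of
--     # running sums of every subarray ending at the current position.
--     def subarray_sums(arr, k):
--         vals = []
--         cur = []  # cur[j] = sum of arr[j..e] for each start j, in start order
--         for e in range(k):
--             x = arr[e]
--             cur = [s + x for s in cur]
--             cur.append(x)
--             vals.extend(cur)
--         return vals
--
--     cntA = Counter(subarray_sums(A, n))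
--     cntB = Counter(subarray_sums(B, m))
--     return sum(cntA[a] * cntB[T - a] for a in cntA.keys())
-- ===== Notes on version B (the rewrite author's own statement) =====
-- stated objective: simpler
-- what changed: Replaces the prefix-sum tables plus nested index-difference generators with a single sweep per array that maintains the running sums of all subarrays ending at the current position; Pre_ excludes n > len(A) or m > len(B), where both implementations raise IndexError.
import Mathlib
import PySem

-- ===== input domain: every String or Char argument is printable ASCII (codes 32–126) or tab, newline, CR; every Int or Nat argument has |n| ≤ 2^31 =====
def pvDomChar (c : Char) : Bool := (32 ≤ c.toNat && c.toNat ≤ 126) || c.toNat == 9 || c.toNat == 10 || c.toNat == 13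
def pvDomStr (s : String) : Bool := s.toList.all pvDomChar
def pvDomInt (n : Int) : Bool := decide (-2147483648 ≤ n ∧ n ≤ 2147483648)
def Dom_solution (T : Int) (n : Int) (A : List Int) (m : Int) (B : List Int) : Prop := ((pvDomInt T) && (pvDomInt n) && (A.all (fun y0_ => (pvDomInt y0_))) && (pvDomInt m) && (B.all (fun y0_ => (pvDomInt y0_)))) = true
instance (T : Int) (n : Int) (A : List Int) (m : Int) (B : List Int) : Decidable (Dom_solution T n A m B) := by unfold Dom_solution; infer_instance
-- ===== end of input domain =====

-- B replaces A's prefix-sum tables and index-difference generators by a single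
-- sweep per array maintaining the running sums of subarrays ending at the
-- current position (objective: simpler; same asymptotic cost).

-- ===== PORT A =====
-- A-side helper: the list of subarray sums via a prefix-sum table and differences
def diffSums (arr : List Int) (k : Int) : List Int :=
  let psum := arr.foldl (fun ps num => ps ++ [PySem.List.pyGetD ps (-1) 0 + num]) [0]
  (PySem.List.pyRange 1 (k + 1) 1).flatMap (fun i =>
    (PySem.List.pyRange 0 i 1).map (fun j =>
      PySem.List.pyGetD psum i 0 - PySem.List.pyGetD psum j 0))

def solution (T : Int) (n : Int) (A : List Int) (m : Int) (B : List Int) : Int :=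
  let cntA := PySem.Dict.counter (diffSums A n)
  let cntB := PySem.Dict.counter (diffSums B m)
  cntA.keys.foldl (fun acc a => acc + cntA.getD a 0 * cntB.getD (T - a) 0) 0

-- ===== PORT B =====
-- B-side helper: one sweep, `cur` holds the sums of all subarrays ending at e
def sweepSums (arr : List Int) (k : Int) : List Int :=
  ((PySem.List.pyRange 0 k 1).foldl (fun (p : List Int × List Int) e =>
      let x := PySem.List.pyGetD arr e 0
      let cur := p.1.map (fun s => s + x) ++ [x]
      (cur, p.2 ++ cur)) ([], [])).2

def solution_alt (T : Int) (n : Int) (A : List Int) (m : Int) (B : List Int) : Int :=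
  let cntA := PySem.Dict.counter (sweepSums A n)
  let cntB := PySem.Dict.counter (sweepSums B m)
  cntA.keys.foldl (fun acc a => acc + cntA.getD a 0 * cntB.getD (T - a) 0) 0

-- ===== PRECONDITION & SPEC =====
-- Pre_ excludes exactly the inputs with n > len(A) or m > len(B), on which the
-- Python A raises IndexError (indexing the prefix-sum table past its end).
def Pre_solution (T : Int) (n : Int) (A : List Int) (m : Int) (B : List Int) : Prop :=
  n ≤ (A.length : Int) ∧ m ≤ (B.length : Int)
instance (T : Int) (n : Int) (A : List Int) (m : Int) (B : List Int) : Decidable (Pre_solution T n A m B) := by unfold Pre_solution; infer_instance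

def pvWitness_solution : Int × Int × List Int × Int × List Int := (5, 2, [1, 2], 1, [3])

def Spec_solution (T : Int) (n : Int) (A : List Int) (m : Int) (B : List Int) (out : Int) : Prop := out = solution_alt T n A m B
instance (T : Int) (n : Int) (A : List Int) (m : Int) (B : List Int) (out : Int) : Decidable (Spec_solution T n A m B out) := by unfold Spec_solution; infer_instance

-- ===== CLAIM (what is proved, stated in full; the proofs are below) =====
def Claim_equal_solution : Prop := ∀ (T : Int) (n : Int) (A : List Int) (m : Int) (B : List Int), Dom_solution T n A m B → Pre_solution T n A m B → Spec_solution T n A m B (solution T n A m B)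

-- ===== LEMMAS AND PROOFS =====

-- the common mathematical value: prefix sum of the first t elements
def pfx (arr : List Int) (t : Nat) : Int := (arr.take t).sum

-- the common clean form of the list of subarray sums, grouped by end position
def cleanSums (arr : List Int) (k : Nat) : List Int :=
  (List.range k).flatMap (fun e =>
    (List.range (e + 1)).map (fun j => pfx arr (e + 1) - pfx arr j))

theorem psum_foldl_eq (arr : List Int) : ∀ (ps : List Int) (c : Int),
    arr.foldl (fun ps num => ps ++ [PySem.List.pyGetD ps (-1) 0 + num]) (ps ++ [c]) =
      ps ++ (List.range (arr.length + 1)).map (fun t => c + (arr.take t).sum) := by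
  induction arr with
  | nil => intro ps c; simp
  | cons x xs ih =>
    intro ps c
    simp only [List.foldl_cons, PySem.List.pyGetD_neg_one_append_singleton]
    rw [show ps ++ [c] ++ [c + x] = (ps ++ [c]) ++ [c + x] by simp]
    rw [ih (ps ++ [c]) (c + x)]
    have hexp : (List.range ((x :: xs).length + 1)).map
          (fun t => c + ((x :: xs).take t).sum)
        = c :: (List.range (xs.length + 1)).map (fun t => (c + x) + (xs.take t).sum) := by
      simp only [List.length_cons]
      rw [List.range_succ_eq_map, List.map_cons, List.map_map]
      simp only [List.take_zero, List.sum_nil, add_zero]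
      congr 1
      apply List.map_congr_left
      intro t _
      simp [Function.comp, List.take_succ_cons, add_assoc]
    rw [hexp]
    simp

theorem diffSums_eq_clean (arr : List Int) (k : Nat) (hk : k ≤ arr.length) :
    diffSums arr (k : Int) = cleanSums arr k := by
  unfold diffSums cleanSums
  have hpsum : arr.foldl (fun ps num => ps ++ [PySem.List.pyGetD ps (-1) 0 + num]) [0]
      = (List.range (arr.length + 1)).map (fun t => pfx arr t) := by
    have h := psum_foldl_eq arr [] 0
    simpa [pfx] using h
  simp only [hpsum]
  rw [PySem.List.pyRange_one 1 ((k : Int) + 1)]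
  rw [show ((k : Int) + 1 - 1).toNat = k by omega]
  rw [List.flatMap_map]
  rw [List.flatMap_def, List.flatMap_def]
  congr 1
  apply List.map_congr_left
  intro e he
  have he' : e < k := List.mem_range.mp he
  rw [show (1 : Int) + (e : Int) = ((e + 1 : Nat) : Int) by push_cast; ring]
  rw [PySem.List.pyRange_zero_natCast, List.map_map]
  apply List.map_congr_left
  intro j hj
  have hj' : j < e + 1 := List.mem_range.mp hj
  simp only [Function.comp, PySem.List.pyGetD_natCast]
  rw [PySem.List.getD_map_range (pfx arr) (arr.length + 1) (e + 1) 0 (by omega),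
      PySem.List.getD_map_range (pfx arr) (arr.length + 1) j 0 (by omega)]

theorem sweep_invariant (arr : List Int) (k : Nat) (hk : k ≤ arr.length) :
    (PySem.List.pyRange 0 (k : Int)).foldl (fun (p : List Int × List Int) e =>
        let x := PySem.List.pyGetD arr e 0
        let cur := p.1.map (fun s => s + x) ++ [x]
        (cur, p.2 ++ cur)) ([], []) =
      ((List.range k).map (fun j => pfx arr k - pfx arr j), cleanSums arr k) := by
  induction k with
  | zero => simp [cleanSums, PySem.List.pyRange_one_eq_nil]
  | succ t ih =>
    rw [show ((t + 1 : Nat) : Int) = (t : Int) + 1 by push_cast; ring]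
    rw [PySem.List.pyRange_one_succ_right (by positivity)]
    rw [List.foldl_append, ih (by omega)]
    simp only [List.foldl_cons, List.foldl_nil]
    have hx : PySem.List.pyGetD arr (t : Int) 0 = pfx arr (t + 1) - pfx arr t := by
      rw [PySem.List.pyGetD_natCast]
      have ht : t < arr.length := by omega
      rw [List.getD_eq_getElem arr 0 ht]
      simp only [pfx]
      rw [List.sum_take_succ arr t ht]
      ring
    rw [hx]
    have hcur : (List.map (fun j => pfx arr t - pfx arr j) (List.range t)).map
          (fun s => s + (pfx arr (t + 1) - pfx arr t)) ++ [pfx arr (t + 1) - pfx arr t]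
        = (List.range (t + 1)).map (fun j => pfx arr (t + 1) - pfx arr j) := by
      rw [List.map_map]
      rw [show (List.range (t + 1)).map (fun j => pfx arr (t + 1) - pfx arr j)
          = (List.range t).map (fun j => pfx arr (t + 1) - pfx arr j)
            ++ [pfx arr (t + 1) - pfx arr t] by
        rw [List.range_succ, List.map_append]; simp]
      congr 1
      exact List.map_congr_left (fun j _ => by simp only [Function.comp_apply]; ring)
    rw [Prod.mk.injEq]
    refine ⟨hcur, ?_⟩
    rw [hcur]
    unfold cleanSums
    rw [List.range_succ, List.flatMap_append]
    simp only [List.flatMap_cons, List.flatMap_nil, List.append_nil,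
      List.append_cancel_left_eq]
    rw [List.range_succ, List.map_append]

theorem sweepSums_eq_clean (arr : List Int) (k : Nat) (hk : k ≤ arr.length) :
    sweepSums arr (k : Int) = cleanSums arr k := by
  unfold sweepSums
  rw [sweep_invariant arr k hk]

theorem sums_eq (arr : List Int) (k : Int) (hk : k ≤ (arr.length : Int)) :
    diffSums arr k = sweepSums arr k := by
  by_cases h : k ≤ 0
  · unfold diffSums sweepSums
    rw [PySem.List.pyRange_one_eq_nil (by omega : k + 1 ≤ 1),
        PySem.List.pyRange_one_eq_nil h]
    simp
  · have h' : (0 : Int) ≤ k := by omega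
    lift k to Nat using h' with t
    have ht : t ≤ arr.length := by exact_mod_cast hk
    rw [diffSums_eq_clean arr t ht, sweepSums_eq_clean arr t ht]

-- ===== VERDICT (by name: the statement is the Claim_ definition above) =====
theorem solution_spec : Claim_equal_solution := by
  intro T n A m B _ hpre
  unfold Spec_solution solution solution_alt
  rw [sums_eq A n hpre.1, sums_eq B m hpre.2]
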